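-- pv_equiv track=rewrite | github.com/ethanumn/pairtree | comparison/neutree/make_mutrels.py | are_same_clusterings
-- ===== SOURCE A (Python) =====
-- def are_same_clusterings(clusterings, garbage):
--   # Tuple conversion probably isn't necessary, but it makes everything
--   # hashable, so it's probably a good idea.
--   _convert_to_tuples = lambda C: tuple([tuple(cluster) for cluster in C])
--   first_C = _convert_to_tuples(clusterings[0])
--   first_G = tuple(garbage[0])
--   for C, G in zip(clusterings[1:], garbage[1:]):
--     if _convert_to_tuples(C) != first_C or tuple(G) != first_G:
--       return False
--   return True
-- ===== SOURCE B (Python) =====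
-- def are_same_clusterings(clusterings, garbage):
--   distinct = {(tuple(tuple(cluster) for cluster in C), tuple(G))
--               for C, G in zip(clusterings, garbage)}
--   return len(distinct) <= 1
-- ===== Notes on version B (the rewrite author's own statement) =====
-- stated objective: idiomatic
-- what changed: Replaces the first-element-then-early-exit pairwise loop by building a set of the hashable (clustering, garbage) pairs over zip and testing that it has at most one element; Pre_ excludes empty clusterings/garbage, where A raises IndexError.
import Mathlib
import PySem

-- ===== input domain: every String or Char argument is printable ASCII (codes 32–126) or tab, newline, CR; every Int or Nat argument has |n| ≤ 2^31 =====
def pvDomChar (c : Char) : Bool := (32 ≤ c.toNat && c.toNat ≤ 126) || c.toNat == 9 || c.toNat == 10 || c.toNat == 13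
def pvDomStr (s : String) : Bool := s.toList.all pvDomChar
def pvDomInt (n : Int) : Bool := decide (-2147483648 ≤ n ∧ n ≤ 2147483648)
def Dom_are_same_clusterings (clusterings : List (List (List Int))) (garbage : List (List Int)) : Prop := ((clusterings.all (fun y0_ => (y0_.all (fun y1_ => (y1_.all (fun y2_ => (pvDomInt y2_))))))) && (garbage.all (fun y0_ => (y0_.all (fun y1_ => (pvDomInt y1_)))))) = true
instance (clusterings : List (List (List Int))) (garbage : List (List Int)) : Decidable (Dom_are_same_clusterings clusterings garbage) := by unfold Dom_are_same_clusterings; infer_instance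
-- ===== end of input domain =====

-- B replaces A's early-exit comparison loop against the first pair by building the set of
-- distinct (clustering, garbage) pairs over zip and testing it has at most one element (idiomatic).
-- Pre_ excludes empty clusterings/garbage, where A raises IndexError.

-- ===== PORT A =====
-- the loop over zip(clusterings[1:], garbage[1:]) with early return False
def ascLoopA (firstC : List (List Int)) (firstG : List Int) :
    List ((List (List Int)) × (List Int)) → Bool
  | [] => true
  | (C, G) :: rest =>
      if C ≠ firstC ∨ G ≠ firstG then false else ascLoopA firstC firstG rest

def are_same_clusterings (clusterings : List (List (List Int))) (garbage : List (List Int)) : Bool :=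
  match clusterings, garbage with
  | c0 :: ctl, g0 :: gtl => ascLoopA c0 g0 (ctl.zip gtl)
  | _, _ => false  -- clusterings[0] / garbage[0] raises IndexError; excluded by Pre_

-- ===== PORT B =====
-- tuple conversion is the identity under the type convention; the set comprehension over zip
def are_same_clusterings_alt (clusterings : List (List (List Int))) (garbage : List (List Int)) : Bool :=
  decide ((PySem.Set.ofList (clusterings.zip garbage)).length ≤ 1)

-- ===== PRECONDITION & SPEC =====
-- A raises IndexError on empty clusterings or empty garbage (clusterings[0] / garbage[0])
def Pre_are_same_clusterings (clusterings : List (List (List Int))) (garbage : List (List Int)) : Prop :=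
  clusterings ≠ [] ∧ garbage ≠ []
instance (clusterings : List (List (List Int))) (garbage : List (List Int)) : Decidable (Pre_are_same_clusterings clusterings garbage) := by unfold Pre_are_same_clusterings; infer_instance

def pvWitness_are_same_clusterings : List (List (List Int)) × List (List Int) :=
  ([[[1, 2]], [[1, 2]]], [[3], [3]])

def Spec_are_same_clusterings (clusterings : List (List (List Int))) (garbage : List (List Int)) (out : Bool) : Prop := out = are_same_clusterings_alt clusterings garbage
instance (clusterings : List (List (List Int))) (garbage : List (List Int)) (out : Bool) : Decidable (Spec_are_same_clusterings clusterings garbage out) := by unfold Spec_are_same_clusterings; infer_instance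

-- ===== CLAIM (what is proved, stated in full; the proofs are below) =====
def Claim_equal_are_same_clusterings : Prop := ∀ (clusterings : List (List (List Int))) (garbage : List (List Int)), Dom_are_same_clusterings clusterings garbage → Pre_are_same_clusterings clusterings garbage → Spec_are_same_clusterings clusterings garbage (are_same_clusterings clusterings garbage)


-- ===== LEMMAS AND PROOFS =====

-- A's loop returns true iff every zipped pair equals the first pair
theorem ascLoopA_eq_all (firstC : List (List Int)) (firstG : List Int)
    (l : List ((List (List Int)) × (List Int))) :
    ascLoopA firstC firstG l = l.all (fun p => p = (firstC, firstG)) := by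
  induction l with
  | nil => rfl
  | cons p rest ih =>
      obtain ⟨C, G⟩ := p
      simp only [ascLoopA, List.all_cons, ih]
      by_cases hC : C = firstC <;> by_cases hG : G = firstG <;>
        simp [hC, hG]

-- a Nodup list whose elements all equal x has at most one element
theorem nodup_all_eq_length_le_one {α : Type} (s : List α) (x : α)
    (hnd : s.Nodup) (h : ∀ z ∈ s, z = x) : s.length ≤ 1 := by
  match s, hnd with
  | [], _ => simp
  | [_], _ => simp
  | a :: b :: t, hnd =>
      exfalso
      have ha : a = x := h a (by simp)
      have hb : b = x := h b (by simp)
      have : a ≠ b := by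
        have := List.nodup_cons.mp hnd
        exact fun hab => this.1 (hab ▸ List.mem_cons_self ..)
      exact this (ha.trans hb.symm)

-- the set of x :: l has at most one element iff every element of l equals x
theorem ofList_cons_len_le_one {α : Type} [BEq α] [LawfulBEq α] (x : α) (l : List α) :
    (PySem.Set.ofList (x :: l)).length ≤ 1 ↔ ∀ y ∈ l, y = x := by
  constructor
  · intro hlen y hy
    have hx : x ∈ PySem.Set.ofList (x :: l) := (PySem.Set.mem_ofList _ _).mpr (by simp)
    have hymem : y ∈ PySem.Set.ofList (x :: l) := (PySem.Set.mem_ofList _ _).mpr (by simp [hy])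
    -- a list of length ≤ 1 containing x is [x]
    match hs : PySem.Set.ofList (x :: l), hlen with
    | [a], _ =>
        rw [hs] at hx hymem
        simp at hx hymem
        rw [hymem, ← hx]
    | [], _ => rw [hs] at hx; simp at hx
  · intro h
    exact nodup_all_eq_length_le_one _ x (PySem.Set.nodup_ofList _)
      (fun z hz => by
        have := (PySem.Set.mem_ofList _ _).mp hz
        rcases List.mem_cons.mp this with h1 | h2
        · exact h1
        · exact h z h2)

-- ===== VERDICT (by name: the statement is the Claim_ definition above) =====
theorem are_same_clusterings_spec : Claim_equal_are_same_clusterings := by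
  intro clusterings garbage _ hpre
  unfold Spec_are_same_clusterings
  obtain ⟨hc, hg⟩ := hpre
  match clusterings, garbage with
  | c0 :: ctl, g0 :: gtl =>
      show ascLoopA c0 g0 (ctl.zip gtl) = _
      unfold are_same_clusterings_alt
      rw [ascLoopA_eq_all]
      have hzip : (c0 :: ctl).zip (g0 :: gtl) = (c0, g0) :: ctl.zip gtl := rfl
      rw [hzip]
      rcases Decidable.em ((PySem.Set.ofList ((c0, g0) :: ctl.zip gtl)).length ≤ 1) with h | h
      · simp only [decide_eq_true h]
        have := (ofList_cons_len_le_one (c0, g0) (ctl.zip gtl)).mp h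
        simp only [List.all_eq_true, decide_eq_true_eq]
        exact fun p hp => this p hp
      · simp only [decide_eq_false h]
        rw [List.all_eq_false]
        by_contra hall
        push Not at hall
        exact h ((ofList_cons_len_le_one _ _).mpr (fun y hy => by
          have := hall y hy
          simpa using this))
  | [], _ => exact absurd rfl hc
  | _ :: _, [] => exact absurd rfl hg
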